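-- pv_equiv track=rewrite | github.com/JaiDevani/ASimpleTweetBot | twitterbot.py | createMasterDict
-- ===== SOURCE A (Python) =====
-- def createMasterDict(tokens):
--     # Dictionary of dictionaries
--     MasterDict = {}
--
--     # prev starts as none
--     prev = None
--
--     # Tokenize the tweet
--     for item in tokens:
--
--         # If the item has not been seen yet
--         if item not in MasterDict:
--
--             # Add it to the first dictionary and set up its new dictionary
--             MasterDict[item] = {}
--
--         # If this is not the first loop
--         if prev is not None:
--
--             # If the current item has not been seen in the prev words dictionary
--             if item not in MasterDict[prev]:
--
--                 # Add it to the dictionary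
--                 MasterDict[prev][item] = 0
--
--             # Add 1 to the count to the dictionary of prev
--             MasterDict[prev][item] = (MasterDict[prev][item] + 1)
--
--         # set prev to the current item
--         prev = item
--
--     # return the new MasterDict
--     return MasterDict
-- ===== SOURCE B (Python) =====
-- def createMasterDict(tokens):
--     # Group-by re-implementation: instead of one interleaved pass updating a
--     # nested dict through a prev pointer, handle one distinct token at a time:
--     # for each first occurrence of a token t, scan the whole bigram list and
--     # count the successors of t, then install the finished inner dict at once.
--     tokens = list(tokens)
--     MasterDict = {}
--     for t in tokens:
--         if t in MasterDict:
--             continue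
--         inner = {}
--         for a, b in zip(tokens, tokens[1:]):
--             if a == t:
--                 inner[b] = inner.get(b, 0) + 1
--         MasterDict[t] = inner
--     return MasterDict
-- ===== Notes on version B (the rewrite author's own statement) =====
-- stated objective: alternative
-- what changed: Replaces A's single interleaved pass that threads a prev pointer through a growing nested dict by a group-by scheme: for each first occurrence of a distinct token, scan the whole bigram list once, build its finished successor-count dict, and install it; O(n*k) nested scans instead of A's O(n) incremental updates.
import Mathlib
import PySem

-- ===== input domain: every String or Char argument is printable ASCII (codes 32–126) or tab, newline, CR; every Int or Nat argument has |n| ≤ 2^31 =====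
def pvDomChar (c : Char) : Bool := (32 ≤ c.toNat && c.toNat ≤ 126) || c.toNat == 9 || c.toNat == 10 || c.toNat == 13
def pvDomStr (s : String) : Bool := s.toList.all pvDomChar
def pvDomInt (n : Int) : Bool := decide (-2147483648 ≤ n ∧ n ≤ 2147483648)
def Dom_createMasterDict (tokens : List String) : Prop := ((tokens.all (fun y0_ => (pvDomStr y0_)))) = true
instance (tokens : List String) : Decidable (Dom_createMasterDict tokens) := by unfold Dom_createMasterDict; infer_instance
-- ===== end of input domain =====

-- B replaces A's single interleaved prev-pointer pass by a group-by scheme (per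
-- distinct token, scan the bigram list and install its finished successor-count
-- dict); objective: alternative.

-- ===== PORT A =====
-- one pass over tokens; state = (dict of dicts, prev : Option String)
def createMasterDict (tokens : List String) : List (String × List (String × Int)) :=
  let st := tokens.foldl
    (fun (st : PySem.Dict String (PySem.Dict String Int) × Option String) item =>
      let d := st.1
      -- if item not in MasterDict: MasterDict[item] = {}
      let d := if d.contains item then d else d.insert item PySem.Dict.empty
      -- if prev is not None: default MasterDict[prev][item] to 0, then add 1
      let d := match st.2 with
        | none => d
        | some prev =>
          let inner := d.getD prev PySem.Dict.empty
          let inner := if inner.contains item then inner else inner.insert item 0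
          d.insert prev (inner.insert item (inner.getD item 0 + 1))
      (d, some item))
    (PySem.Dict.empty, none)
  st.1.items.map (fun p => (p.1, p.2.items))

-- ===== PORT B =====
-- inner loop of B: for a, b in zip(tokens, tokens[1:]): if a == t: inner[b] = inner.get(b, 0) + 1
def pvInnerFor (pairs : List (String × String)) (t : String) : PySem.Dict String Int :=
  pairs.foldl
    (fun inn p => if p.1 == t then inn.insert p.2 (inn.getD p.2 0 + 1) else inn)
    PySem.Dict.empty

-- outer loop of B: skip already-seen tokens, else install the finished inner dict
def createMasterDict_alt (tokens : List String) : List (String × List (String × Int)) :=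
  let pairs := tokens.zip tokens.tail
  let d := tokens.foldl
    (fun (d : PySem.Dict String (PySem.Dict String Int)) t =>
      if d.contains t then d else d.insert t (pvInnerFor pairs t))
    PySem.Dict.empty
  d.items.map (fun p => (p.1, p.2.items))

-- ===== PRECONDITION & SPEC =====
def Spec_createMasterDict (tokens : List String) (out : List (String × List (String × Int))) : Prop := out = createMasterDict_alt tokens
instance (tokens : List String) (out : List (String × List (String × Int))) : Decidable (Spec_createMasterDict tokens out) := by unfold Spec_createMasterDict; infer_instance

-- ===== CLAIM (what is proved, stated in full; the proofs are below) =====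
def Claim_equal_createMasterDict : Prop := ∀ (tokens : List String), Dom_createMasterDict tokens → Spec_createMasterDict tokens (createMasterDict tokens)

-- ===== LEMMAS AND PROOFS =====

-- named copies of the loop bodies appearing in the two ports
def pvKstep (d : PySem.Dict String (PySem.Dict String Int)) (t : String) :
    PySem.Dict String (PySem.Dict String Int) :=
  if d.contains t then d else d.insert t PySem.Dict.empty

def pvPupd (d : PySem.Dict String (PySem.Dict String Int)) (pr : String × String) :
    PySem.Dict String (PySem.Dict String Int) :=
  d.insert pr.1 ((d.getD pr.1 PySem.Dict.empty).insert pr.2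
    ((d.getD pr.1 PySem.Dict.empty).getD pr.2 0 + 1))

def pvAstep (st : PySem.Dict String (PySem.Dict String Int) × Option String) (item : String) :
    PySem.Dict String (PySem.Dict String Int) × Option String :=
  let d := st.1
  let d := if d.contains item then d else d.insert item PySem.Dict.empty
  let d := match st.2 with
    | none => d
    | some prev =>
      let inner := d.getD prev PySem.Dict.empty
      let inner := if inner.contains item then inner else inner.insert item 0
      d.insert prev (inner.insert item (inner.getD item 0 + 1))
  (d, some item)

-- B's conditional-insert outer step, with the installed value abstracted
def pvCstep (g : String → PySem.Dict String Int)
    (d : PySem.Dict String (PySem.Dict String Int)) (t : String) :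
    PySem.Dict String (PySem.Dict String Int) :=
  if d.contains t then d else d.insert t (g t)

theorem contains_pvKstep_mono (d : PySem.Dict String (PySem.Dict String Int)) (u x : String)
    (h : d.contains x = true) : (pvKstep d u).contains x = true := by
  unfold pvKstep
  split
  · exact h
  · simp [PySem.Dict.contains_insert, h]

theorem contains_pvKstep_self (d : PySem.Dict String (PySem.Dict String Int)) (t : String) :
    (pvKstep d t).contains t = true := by
  rw [pvKstep]
  split
  · assumption
  · exact PySem.Dict.contains_insert_self _ _ _

theorem contains_pvPupd (d : PySem.Dict String (PySem.Dict String Int)) (pr : String × String)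
    (hp : d.contains pr.1 = true) (u : String) : (pvPupd d pr).contains u = d.contains u := by
  unfold pvPupd
  rw [PySem.Dict.contains_insert]
  by_cases h : u = pr.1
  · subst h; simp [hp]
  · simp [h]

-- inserting a FRESH key commutes (incl. item order) with overwriting an EXISTING key
theorem insert_swap_fresh (d : PySem.Dict String (PySem.Dict String Int))
    (p u : String) (v : PySem.Dict String Int)
    (hp : d.contains p = true) (hu : d.contains u = false) (hne : u ≠ p) :
    (d.insert p v).insert u PySem.Dict.empty = (d.insert u PySem.Dict.empty).insert p v := by
  apply PySem.Dict.ext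
  rw [PySem.Dict.items_insert_of_not_contains (h := by
        rw [PySem.Dict.contains_insert]; simp [hne, hu]),
      PySem.Dict.items_insert_of_contains (h := hp),
      PySem.Dict.items_insert_of_contains (h := by
        rw [PySem.Dict.contains_insert]; simp [hp]),
      PySem.Dict.items_insert_of_not_contains (h := hu)]
  rw [List.map_append]
  simp
  intro h; exact absurd h hne

theorem pvKstep_pvPupd_comm (d : PySem.Dict String (PySem.Dict String Int))
    (pr : String × String) (hp : d.contains pr.1 = true) (u : String) :
    pvKstep (pvPupd d pr) u = pvPupd (pvKstep d u) pr := by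
  by_cases hu : d.contains u = true
  · rw [pvKstep, contains_pvPupd d pr hp u, hu, if_pos rfl, pvKstep, if_pos hu]
  · have hu' : d.contains u = false := by simpa using hu
    have hne : u ≠ pr.1 := fun h => by rw [h, hp] at hu'; cases hu'
    rw [pvKstep, contains_pvPupd d pr hp u, hu', if_neg (by simp), pvKstep, if_neg (by simp [hu'])]
    unfold pvPupd
    rw [PySem.Dict.getD_insert_of_ne (hne := Ne.symm hne)]
    exact insert_swap_fresh d pr.1 u _ hp hu' hne

theorem pvKfold_pvPupd_comm (l : List String) (d : PySem.Dict String (PySem.Dict String Int))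
    (pr : String × String) (hp : d.contains pr.1 = true) :
    l.foldl pvKstep (pvPupd d pr) = pvPupd (l.foldl pvKstep d) pr := by
  induction l generalizing d with
  | nil => rfl
  | cons u rest ih =>
    simp only [List.foldl_cons]
    rw [pvKstep_pvPupd_comm d pr hp u, ih _ (contains_pvKstep_mono d u pr.1 hp)]

-- A's loop body at state (d, some p) = key step then pair-count step
theorem pvAstep_some (d : PySem.Dict String (PySem.Dict String Int)) (p t : String) :
    pvAstep (d, some p) t = (pvPupd (pvKstep d t) (p, t), some t) := by
  simp only [pvAstep, pvPupd, pvKstep]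
  by_cases h : ((if d.contains t = true then d else d.insert t PySem.Dict.empty).getD p PySem.Dict.empty).contains t = true
  · simp [h]
  · have hc : ((if d.contains t = true then d else d.insert t PySem.Dict.empty).getD p PySem.Dict.empty).contains t = false := by
      simpa using h
    simp only [hc, Bool.false_eq_true, if_false]
    rw [PySem.Dict.insert_insert_self, PySem.Dict.getD_insert_self,
        PySem.Dict.getD_of_not_contains (h := hc)]

-- A's remaining loop = all key steps first, then all pair-count steps
theorem pvAloop (l : List String) (d : PySem.Dict String (PySem.Dict String Int)) (p : String)
    (hp : d.contains p = true) :
    (l.foldl pvAstep (d, some p)).1 =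
      ((p :: l).zip l).foldl pvPupd (l.foldl pvKstep d) := by
  induction l generalizing d p with
  | nil => rfl
  | cons t rest ih =>
    simp only [List.foldl_cons, List.zip_cons_cons]
    rw [pvAstep_some d p t,
        ih (pvPupd (pvKstep d t) (p, t)) t
          (by rw [contains_pvPupd _ _ (contains_pvKstep_mono d t p hp) t]
              exact contains_pvKstep_self d t),
        pvKfold_pvPupd_comm rest _ (p, t) (contains_pvKstep_mono d t p hp)]

-- keys of a conditional-insert fold do not depend on the installed values
theorem keys_pvCstep_fold (l : List String) (g : String → PySem.Dict String Int)
    (d : PySem.Dict String (PySem.Dict String Int)) :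
    (l.foldl (pvCstep g) d).keys = PySem.Set.update d.keys l := by
  induction l generalizing d with
  | nil => rfl
  | cons t rest ih =>
    simp only [List.foldl_cons, PySem.Set.update]
    rw [ih]
    congr 1
    by_cases h : d.contains t = true
    · have hm : t ∈ d.keys := (PySem.Dict.contains_iff_mem_keys d t).mp h
      rw [pvCstep, if_pos h, PySem.Set.add, if_pos (by simp [PySem.Set.contains, hm])]
    · have h' : d.contains t = false := by simpa using h
      have hm : t ∉ d.keys := fun hm =>
        absurd ((PySem.Dict.contains_iff_mem_keys d t).mpr hm) (by simp [h'])
      rw [pvCstep, if_neg (by simp [h']), PySem.Dict.keys_insert_of_not_contains (h := h'),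
        PySem.Set.add, if_neg (by simp [PySem.Set.contains, hm])]

-- lookups in a conditional-insert fold: untouched if the key was already present
theorem getD_pvCstep_fold_of_contains (l : List String) (g : String → PySem.Dict String Int)
    (d : PySem.Dict String (PySem.Dict String Int)) (a : String)
    (h : d.contains a = true) :
    (l.foldl (pvCstep g) d).getD a PySem.Dict.empty = d.getD a PySem.Dict.empty := by
  induction l generalizing d with
  | nil => rfl
  | cons t rest ih =>
    simp only [List.foldl_cons]
    by_cases ht : d.contains t = true
    · rw [pvCstep, if_pos ht, ih d h]
    · have ht' : d.contains t = false := by simpa using ht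
      have hne : a ≠ t := fun he => by rw [he] at h; rw [h] at ht'; cases ht'
      rw [pvCstep, if_neg (by simp [ht']),
        ih _ (by rw [PySem.Dict.contains_insert]; simp [h]),
        PySem.Dict.getD_insert_of_ne (hne := hne)]

-- lookups in a conditional-insert fold: a fresh key receives exactly g a
theorem getD_pvCstep_fold_of_mem (l : List String) (g : String → PySem.Dict String Int)
    (d : PySem.Dict String (PySem.Dict String Int)) (a : String)
    (h : d.contains a = false) (hm : a ∈ l) :
    (l.foldl (pvCstep g) d).getD a PySem.Dict.empty = g a := by
  induction l generalizing d with
  | nil => cases hm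
  | cons t rest ih =>
    simp only [List.foldl_cons]
    by_cases he : t = a
    · subst he
      rw [pvCstep, if_neg (by simp [h]),
        getD_pvCstep_fold_of_contains rest g _ t (PySem.Dict.contains_insert_self _ _ _),
        PySem.Dict.getD_insert_self]
    · have hm' : a ∈ rest := by
        cases hm with
        | head => exact absurd rfl he
        | tail _ h2 => exact h2
      by_cases ht : d.contains t = true
      · rw [pvCstep, if_pos ht, ih d h hm']
      · rw [pvCstep, if_neg (by simpa using ht)]
        exact ih _ (by rw [PySem.Dict.contains_insert]; simp [h, Ne.symm he]) hm'

-- projection of A's pair-count fold onto one outer key = B's inner counting loop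
theorem getD_pvPupd_fold (pairs : List (String × String))
    (d : PySem.Dict String (PySem.Dict String Int)) (a : String) :
    (pairs.foldl pvPupd d).getD a PySem.Dict.empty =
      pairs.foldl
        (fun inn p => if p.1 == a then inn.insert p.2 (inn.getD p.2 0 + 1) else inn)
        (d.getD a PySem.Dict.empty) := by
  induction pairs generalizing d with
  | nil => rfl
  | cons p rest ih =>
    simp only [List.foldl_cons]
    rw [ih]
    congr 1
    by_cases he : p.1 = a
    · subst he
      rw [pvPupd, PySem.Dict.getD_insert_self, if_pos (by simp)]
    · rw [pvPupd, PySem.Dict.getD_insert_of_ne (hne := fun h => he h.symm),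
        if_neg (by simpa using he)]

-- the pair-count fold keeps the key list (it only overwrites existing keys)
theorem keys_pvPupd_fold (pairs : List (String × String))
    (d : PySem.Dict String (PySem.Dict String Int))
    (h : ∀ p ∈ pairs, d.contains p.1 = true) :
    (pairs.foldl pvPupd d).keys = d.keys := by
  induction pairs generalizing d with
  | nil => rfl
  | cons p rest ih =>
    simp only [List.foldl_cons]
    rw [ih _ (fun q hq => by
        rw [contains_pvPupd d p (h p (List.mem_cons_self)) q.1]
        exact h q (List.mem_cons_of_mem _ hq))]
    rw [pvPupd, PySem.Dict.keys_insert_of_contains (h := h p (List.mem_cons_self))]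

-- ===== VERDICT (by name: the statement is the Claim_ definition above) =====
theorem createMasterDict_spec : Claim_equal_createMasterDict := by
  intro tokens _
  unfold Spec_createMasterDict
  have hA : createMasterDict tokens
      = (tokens.foldl pvAstep (PySem.Dict.empty, none)).1.items.map (fun p => (p.1, p.2.items)) := rfl
  have hB : createMasterDict_alt tokens
      = (tokens.foldl (pvCstep (pvInnerFor (tokens.zip tokens.tail)))
          PySem.Dict.empty).items.map (fun p => (p.1, p.2.items)) := rfl
  rw [hA, hB]
  cases tokens with
  | nil => rfl
  | cons t rest =>
    -- names for the three dictionaries involved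
    set pairs : List (String × String) := (t :: rest).zip rest with hpairs
    have hzip : (t :: rest).zip (t :: rest).tail = pairs := rfl
    have hfirst : ∀ p ∈ pairs, p.1 ∈ t :: rest := fun p hp => (List.of_mem_zip hp).1
    -- A's fold = key pass then pair pass
    have h1 : (t :: rest).foldl pvAstep (PySem.Dict.empty, none)
        = rest.foldl pvAstep (pvKstep PySem.Dict.empty t, some t) := rfl
    have hDA : ((t :: rest).foldl pvAstep (PySem.Dict.empty, none)).1
        = pairs.foldl pvPupd ((t :: rest).foldl pvKstep PySem.Dict.empty) := by
      rw [h1, pvAloop rest _ t (contains_pvKstep_self _ t)]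
      rfl
    rw [hDA, hzip]
    -- both final dicts, as conditional-insert folds
    have hK : pvKstep = pvCstep (fun _ => PySem.Dict.empty) := rfl
    set d0 := (t :: rest).foldl (pvCstep (fun _ => PySem.Dict.empty)) PySem.Dict.empty with hd0
    set dB := (t :: rest).foldl (pvCstep (pvInnerFor pairs)) PySem.Dict.empty with hdB
    set dA := pairs.foldl pvPupd d0 with hdA
    rw [hK]
    -- shared key skeleton
    have hkeys0 : d0.keys = PySem.Set.ofList (t :: rest) := by
      rw [hd0, keys_pvCstep_fold]; rfl
    have hkeysB : dB.keys = PySem.Set.ofList (t :: rest) := by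
      rw [hdB, keys_pvCstep_fold]; rfl
    have hmem0 : ∀ a, a ∈ t :: rest → d0.contains a = true := by
      intro a ha
      exact (PySem.Dict.contains_iff_mem_keys d0 a).mpr
        (by rw [hkeys0]; exact (PySem.Set.mem_ofList _ _).mpr ha)
    have hkeysA : dA.keys = PySem.Set.ofList (t :: rest) := by
      rw [hdA, keys_pvPupd_fold pairs d0 (fun p hp => hmem0 p.1 (hfirst p hp))]
      exact hkeys0
    -- matching lookups on members
    have hgetD : ∀ a, a ∈ t :: rest →
        dA.getD a PySem.Dict.empty = dB.getD a PySem.Dict.empty := by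
      intro a ha
      rw [hdA, getD_pvPupd_fold, hd0,
        getD_pvCstep_fold_of_mem _ _ _ _ (PySem.Dict.contains_empty _) ha, hdB,
        getD_pvCstep_fold_of_mem _ _ _ _ (PySem.Dict.contains_empty _) ha]
      rfl
    -- conclude via items = keys.map (k, getD k)
    have hnodupA : dA.keys.Nodup := by rw [hkeysA]; exact PySem.Set.nodup_ofList _
    have hnodupB : dB.keys.Nodup := by rw [hkeysB]; exact PySem.Set.nodup_ofList _
    rw [PySem.Dict.items_eq_map_keys dA hnodupA PySem.Dict.empty,
        PySem.Dict.items_eq_map_keys dB hnodupB PySem.Dict.empty, hkeysA, hkeysB]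
    apply congrArg
    apply List.map_congr_left
    intro a ha
    rw [hgetD a ((PySem.Set.mem_ofList _ _).mp ha)]
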